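-- pv_equiv track=rewrite | github.com/Nargaruga/molecular_dynamics_wizard | scripts/compare_sims.py | get_paratope_selections
-- ===== SOURCE A (Python) =====
-- class ComparisonError(Exception):
--     pass
--
-- def get_paratope_selections(
--     paratope_residues, heavy_chains: list[str], light_chains: list[str]
-- ):
--     if not paratope_residues:
--         raise ComparisonError("No paratope residues found")
--
--     heavy_chains_sels = []
--     for hc in heavy_chains:
--         heavy_chains_sels.append(
--             (
--                 hc,
--                 "name CA and ("
--                 + " or ".join(
--                     [
--                         f"(resid {res} and chainID {chain})"
--                         for res, chain in paratope_residues
--                         if chain == hc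
--                     ]
--                 )
--                 + ")",
--             ),
--         )
--
--     light_chains_sels = []
--     for lc in light_chains:
--         light_chains_sels.append(
--             (
--                 lc,
--                 "name CA and ("
--                 + " or ".join(
--                     [
--                         f"(resid {res} and chainID {chain})"
--                         for res, chain in paratope_residues
--                         if chain == lc
--                     ]
--                 )
--                 + ")",
--             )
--         )
--
--     paratope = (
--         "name CA and ("
--         + " or ".join(
--             [f"(resid {res} and chainID {chain})" for res, chain in paratope_residues]
--         )
--         + ")"
--     )
--
--     return paratope, heavy_chains_sels, light_chains_sels
-- ===== SOURCE B (Python) =====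
-- class ComparisonError(Exception):
--     pass
--
--
-- def get_paratope_selections(
--     paratope_residues, heavy_chains: list[str], light_chains: list[str]
-- ):
--     if not paratope_residues:
--         raise ComparisonError("No paratope residues found")
--
--     # one pass: collect all clauses and group them by chain
--     clauses = []
--     by_chain = {}
--     for res, chain in paratope_residues:
--         c = f"(resid {res} and chainID {chain})"
--         clauses.append(c)
--         by_chain[chain] = by_chain.get(chain, []) + [c]
--
--     def sel(ch):
--         return (ch, "name CA and (" + " or ".join(by_chain.get(ch, [])) + ")")
--
--     paratope = "name CA and (" + " or ".join(clauses) + ")"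
--     return paratope, [sel(hc) for hc in heavy_chains], [sel(lc) for lc in light_chains]
-- ===== Notes on version B (the rewrite author's own statement) =====
-- stated objective: faster
-- what changed: B scans paratope_residues once, grouping clause strings by chain in a dict, then assembles each chain selection by a single dict lookup instead of re-filtering the residue list for every chain.
import Mathlib
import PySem

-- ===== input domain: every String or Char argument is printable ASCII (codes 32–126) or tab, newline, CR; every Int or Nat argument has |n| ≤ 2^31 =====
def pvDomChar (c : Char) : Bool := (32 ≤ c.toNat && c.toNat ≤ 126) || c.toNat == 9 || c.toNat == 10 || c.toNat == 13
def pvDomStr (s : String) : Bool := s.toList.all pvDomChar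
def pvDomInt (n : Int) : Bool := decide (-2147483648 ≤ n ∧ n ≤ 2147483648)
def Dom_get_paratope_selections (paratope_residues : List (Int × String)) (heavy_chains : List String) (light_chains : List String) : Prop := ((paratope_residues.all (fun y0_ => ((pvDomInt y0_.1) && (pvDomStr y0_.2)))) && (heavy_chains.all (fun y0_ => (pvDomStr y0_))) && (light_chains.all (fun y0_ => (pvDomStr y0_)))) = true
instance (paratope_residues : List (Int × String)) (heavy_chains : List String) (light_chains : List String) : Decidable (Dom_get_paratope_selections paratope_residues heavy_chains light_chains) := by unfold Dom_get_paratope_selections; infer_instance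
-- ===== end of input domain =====

-- B replaces A's per-chain re-filter of paratope_residues by one grouping pass into a
-- dict (faster: one scan instead of one scan per chain); equivalence proved on Pre_
-- (nonempty paratope_residues; A raises ComparisonError on the empty list).

-- ===== PORT A =====
-- f"(resid {res} and chainID {chain})"
def pvClause (p : Int × String) : String :=
  "(resid " ++ PySem.Int.toStr p.1 ++ " and chainID " ++ p.2 ++ ")"

def get_paratope_selections (paratope_residues : List (Int × String)) (heavy_chains : List String) (light_chains : List String) : String × (List (String × String)) × (List (String × String)) :=
  -- for hc in heavy_chains: append (hc, "name CA and (" + " or ".join([... if chain == hc]) + ")")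
  let heavy_chains_sels : List (String × String) :=
    heavy_chains.foldl (fun acc hc =>
      acc ++ [(hc, "name CA and (" ++
        PySem.Str.join " or " ((paratope_residues.filter (fun p => p.2 == hc)).map pvClause)
        ++ ")")]) []
  let light_chains_sels : List (String × String) :=
    light_chains.foldl (fun acc lc =>
      acc ++ [(lc, "name CA and (" ++
        PySem.Str.join " or " ((paratope_residues.filter (fun p => p.2 == lc)).map pvClause)
        ++ ")")]) []
  let paratope : String :=
    "name CA and (" ++ PySem.Str.join " or " (paratope_residues.map pvClause) ++ ")"
  (paratope, heavy_chains_sels, light_chains_sels)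

-- ===== PORT B =====
-- one pass over paratope_residues building (clauses, by_chain dict); then per-chain lookup
def get_paratope_selections_alt (paratope_residues : List (Int × String)) (heavy_chains : List String) (light_chains : List String) : String × (List (String × String)) × (List (String × String)) :=
  let st : List String × PySem.Dict String (List String) :=
    paratope_residues.foldl (fun st p =>
      let c := pvClause p
      (st.1 ++ [c], st.2.insert p.2 (st.2.getD p.2 [] ++ [c])))
      ([], PySem.Dict.empty)
  let sel : String → String × String := fun ch =>
    (ch, "name CA and (" ++ PySem.Str.join " or " (st.2.getD ch []) ++ ")")
  ("name CA and (" ++ PySem.Str.join " or " st.1 ++ ")",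
   heavy_chains.map sel, light_chains.map sel)

-- ===== PRECONDITION & SPEC =====
-- Pre_ excludes the empty paratope_residues list, on which Python A raises ComparisonError.
def Pre_get_paratope_selections (paratope_residues : List (Int × String)) (heavy_chains : List String) (light_chains : List String) : Prop := paratope_residues ≠ []
instance (paratope_residues : List (Int × String)) (heavy_chains : List String) (light_chains : List String) : Decidable (Pre_get_paratope_selections paratope_residues heavy_chains light_chains) := by unfold Pre_get_paratope_selections; infer_instance

def pvWitness_get_paratope_selections : (List (Int × String)) × List String × List String :=
  ([(7, "H"), (3, "L")], ["H"], ["L"])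

def Spec_get_paratope_selections (paratope_residues : List (Int × String)) (heavy_chains : List String) (light_chains : List String) (out : String × (List (String × String)) × (List (String × String))) : Prop := out = get_paratope_selections_alt paratope_residues heavy_chains light_chains
instance (paratope_residues : List (Int × String)) (heavy_chains : List String) (light_chains : List String) (out : String × (List (String × String)) × (List (String × String))) : Decidable (Spec_get_paratope_selections paratope_residues heavy_chains light_chains out) := by unfold Spec_get_paratope_selections; infer_instance

-- ===== CLAIM (what is proved, stated in full; the proofs are below) =====
def Claim_equal_get_paratope_selections : Prop := ∀ (paratope_residues : List (Int × String)) (heavy_chains : List String) (light_chains : List String), Dom_get_paratope_selections paratope_residues heavy_chains light_chains → Pre_get_paratope_selections paratope_residues heavy_chains light_chains → Spec_get_paratope_selections paratope_residues heavy_chains light_chains (get_paratope_selections paratope_residues heavy_chains light_chains)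

-- ===== LEMMAS AND PROOFS =====

-- first component of B's fold: just all clauses in order
theorem pvFold_fst (pr : List (Int × String)) (acc : List String)
    (d : PySem.Dict String (List String)) :
    (pr.foldl (fun st p =>
      let c := pvClause p
      (st.1 ++ [c], st.2.insert p.2 (st.2.getD p.2 [] ++ [c]))) (acc, d)).1
    = acc ++ pr.map pvClause := by
  induction pr generalizing acc d with
  | nil => simp
  | cons p t ih => simp [List.foldl_cons, ih]

-- second component of B's fold: per-chain lookup = A's filter + map
theorem pvFold_snd (pr : List (Int × String)) (acc : List String)
    (d : PySem.Dict String (List String)) (ch : String) :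
    ((pr.foldl (fun st p =>
      let c := pvClause p
      (st.1 ++ [c], st.2.insert p.2 (st.2.getD p.2 [] ++ [c]))) (acc, d)).2).getD ch []
    = d.getD ch [] ++ (pr.filter (fun p => p.2 == ch)).map pvClause := by
  induction pr generalizing acc d with
  | nil => simp
  | cons p t ih =>
    simp only [List.foldl_cons, ih, List.filter_cons]
    by_cases h : ch = p.2
    · simp [PySem.Dict.getD_insert, h]
    · have h' : (p.2 == ch) = false := by simp [Ne.symm h]
      simp [PySem.Dict.getD_insert, h, h']

-- ===== VERDICT (by name: the statement is the Claim_ definition above) =====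
theorem get_paratope_selections_spec : Claim_equal_get_paratope_selections := by
  intro pr hc lc _ _
  show _ = _
  unfold get_paratope_selections get_paratope_selections_alt
  simp only [pvFold_fst, pvFold_snd, PySem.Dict.getD_empty, List.nil_append,
    PySem.List.foldl_append_singleton_eq_map]
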